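-- pv_equiv track=rewrite | github.com/Hammamelsh/Working_on_some_worl | stdf-data-factory/unified_app.py | apply_adaptive_logic
-- ===== SOURCE A (Python) =====
-- def apply_adaptive_logic(expert_validations, data_types, validation_data):
--     """Apply intelligent N/A logic - ONLY mark N/A when truly not applicable"""
--
--     # Detect entity characteristics
--     sample = validation_data[0] if validation_data else {}
--     entity_name = sample.get('Entity_Name', '').lower()
--     unit = sample.get('Unit', '').lower()
--
--     is_battery = 'battery' in entity_name or 'lithium' in entity_name
--     is_ev = 'ev' in entity_name or 'electric vehicle' in entity_name
--     is_energy = any(term in entity_name for term in ['solar', 'wind', 'oil', 'gas', 'coal', 'energy'])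
--     is_commodity = any(term in entity_name for term in ['aluminum', 'copper', 'steel'])
--
--     # ONLY these validators should be marked N/A for specific data
--     for validator_key in list(expert_validations.keys()):
--
--         # Battery-specific validators - ONLY N/A for non-battery data
--         if validator_key in ['battery_size_evolution', 'lithium_chemistry']:
--             if not is_battery:
--                 expert_validations[validator_key] = [{
--                     'product': 'All',
--                     'region': 'All',
--                     'pass': None,
--                     'explanation': f'N/A - Only applies to battery data, not {entity_name}'
--                 }]
--
--         # EV/Energy-specific validators
--         elif validator_key in ['oil_displacement', 'derived_oil_displacement', 'capacity_factor', 'global_oil_sanity']: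
--             if not (is_ev or is_energy):
--                 expert_validations[validator_key] = [{
--                     'product': 'All',
--                     'region': 'All',
--                     'pass': None,
--                     'explanation': f'N/A - Only applies to energy/EV data, not {entity_name}'
--                 }]
--
--     return expert_validations
-- ===== SOURCE B (Python) =====
-- def apply_adaptive_logic(expert_validations, data_types, validation_data):
--     """Table-driven N/A logic: build override entries once, apply with a single dict.update.
--     (Mutates expert_validations in place, like the original.)"""
--     sample = validation_data[0] if validation_data else {}
--     entity_name = sample.get('Entity_Name', '').lower()
--
--     is_battery = 'battery' in entity_name or 'lithium' in entity_name
--     is_ev = 'ev' in entity_name or 'electric vehicle' in entity_name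
--     is_energy = any(term in entity_name for term in ['solar', 'wind', 'oil', 'gas', 'coal', 'energy'])
--
--     groups = [
--         (['battery_size_evolution', 'lithium_chemistry'], is_battery,
--          f'N/A - Only applies to battery data, not {entity_name}'),
--         (['oil_displacement', 'derived_oil_displacement', 'capacity_factor', 'global_oil_sanity'],
--          is_ev or is_energy,
--          f'N/A - Only applies to energy/EV data, not {entity_name}'),
--     ]
--     expert_validations.update(
--         (key, [{'product': 'All', 'region': 'All', 'pass': None, 'explanation': explanation}])
--         for keys, applicable, explanation in groups
--         if not applicable
--         for key in keys
--         if key in expert_validations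
--     )
--     return expert_validations
-- ===== Notes on version B (the rewrite author's own statement) =====
-- stated objective: idiomatic
-- what changed: Replaces A's per-key if/elif branch chain inside the loop by a precomputed group table from which the N/A override entries are generated and applied with a single dict.update; Pre_ excludes only association lists with duplicate keys in a dict-typed component (expert_validations or the first validation_data row), which correspond to no Python dict, so no Python-reachable input is excluded.
import Mathlib
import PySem

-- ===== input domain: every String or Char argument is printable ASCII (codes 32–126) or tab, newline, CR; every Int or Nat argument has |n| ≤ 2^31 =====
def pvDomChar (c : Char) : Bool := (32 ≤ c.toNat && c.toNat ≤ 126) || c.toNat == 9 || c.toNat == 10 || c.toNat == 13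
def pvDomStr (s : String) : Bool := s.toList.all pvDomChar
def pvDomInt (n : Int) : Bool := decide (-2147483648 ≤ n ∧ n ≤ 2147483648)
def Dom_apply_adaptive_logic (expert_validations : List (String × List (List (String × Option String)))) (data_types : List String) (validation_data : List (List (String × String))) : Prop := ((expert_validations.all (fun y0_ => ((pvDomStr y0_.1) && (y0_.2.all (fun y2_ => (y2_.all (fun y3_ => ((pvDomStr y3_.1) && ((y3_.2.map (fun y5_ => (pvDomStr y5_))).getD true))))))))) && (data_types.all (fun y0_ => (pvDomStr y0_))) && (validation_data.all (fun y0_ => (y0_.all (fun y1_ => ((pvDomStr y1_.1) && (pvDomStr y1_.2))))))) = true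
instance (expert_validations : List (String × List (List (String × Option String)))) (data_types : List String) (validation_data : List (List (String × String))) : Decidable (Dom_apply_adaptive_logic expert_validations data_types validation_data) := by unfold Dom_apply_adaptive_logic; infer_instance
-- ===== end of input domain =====

-- B replaces A's per-key if/elif branch chain by a precomputed group table whose override entries
-- are applied with one dict.update (idiomatic, table-driven; same cost). Both the Python A and the
-- Python B mutate expert_validations in place; the equivalence proved here is about the return value.

-- ===== PORT A =====
-- Python dict assignment d[k] = v on an association list: overwrite the first occurrence in
-- place, append a fresh key at the end (exact Python dict behaviour).
def pvSetKey {V : Type} : List (String × V) → String → V → List (String × V)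
  | [], k, v => [(k, v)]
  | (k', v') :: rest, k, v =>
      if k' == k then (k, v) :: rest else (k', v') :: pvSetKey rest k v

def apply_adaptive_logic (expert_validations : List (String × List (List (String × Option String)))) (data_types : List String) (validation_data : List (List (String × String))) : List (String × List (List (String × Option String))) :=
  let sample := validation_data.headD []
  let entity_name := PySem.Str.lower ((List.lookup "Entity_Name" sample).getD "")
  let _unit := PySem.Str.lower ((List.lookup "Unit" sample).getD "")  -- computed by A, unused
  let is_battery := PySem.Str.isIn "battery" entity_name || PySem.Str.isIn "lithium" entity_name
  let is_ev := PySem.Str.isIn "ev" entity_name || PySem.Str.isIn "electric vehicle" entity_name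
  let is_energy := (["solar", "wind", "oil", "gas", "coal", "energy"]).any
      (fun term => PySem.Str.isIn term entity_name)
  let _is_commodity := (["aluminum", "copper", "steel"]).any
      (fun term => PySem.Str.isIn term entity_name)  -- computed by A, unused
  (expert_validations.map Prod.fst).foldl (fun d validator_key =>
    if validator_key ∈ ["battery_size_evolution", "lithium_chemistry"] then
      (if !is_battery then
        pvSetKey d validator_key
          [[("product", some "All"), ("region", some "All"), ("pass", none),
            ("explanation", some ("N/A - Only applies to battery data, not " ++ entity_name))]]
      else d)
    else if validator_key ∈ ["oil_displacement", "derived_oil_displacement", "capacity_factor", "global_oil_sanity"] then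
      (if !(is_ev || is_energy) then
        pvSetKey d validator_key
          [[("product", some "All"), ("region", some "All"), ("pass", none),
            ("explanation", some ("N/A - Only applies to energy/EV data, not " ++ entity_name))]]
      else d)
    else d) expert_validations

-- ===== PORT B =====
def apply_adaptive_logic_alt (expert_validations : List (String × List (List (String × Option String)))) (data_types : List String) (validation_data : List (List (String × String))) : List (String × List (List (String × Option String))) :=
  let sample := validation_data.headD []
  let entity_name := PySem.Str.lower ((List.lookup "Entity_Name" sample).getD "")
  let is_battery := PySem.Str.isIn "battery" entity_name || PySem.Str.isIn "lithium" entity_name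
  let is_ev := PySem.Str.isIn "ev" entity_name || PySem.Str.isIn "electric vehicle" entity_name
  let is_energy := (["solar", "wind", "oil", "gas", "coal", "energy"]).any
      (fun term => PySem.Str.isIn term entity_name)
  let groups : List (List String × Bool × String) :=
    [(["battery_size_evolution", "lithium_chemistry"], is_battery,
      "N/A - Only applies to battery data, not " ++ entity_name),
     (["oil_displacement", "derived_oil_displacement", "capacity_factor", "global_oil_sanity"],
      is_ev || is_energy,
      "N/A - Only applies to energy/EV data, not " ++ entity_name)]
  let overrides := groups.foldl (fun acc g =>
      if !g.2.1 then
        acc ++ (g.1.filter (fun key => expert_validations.any (fun e => e.1 == key))).map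
          (fun key => (key,
            [[("product", some "All"), ("region", some "All"), ("pass", (none : Option String)),
              ("explanation", some g.2.2)]]))
      else acc) []
  overrides.foldl (fun d p => pvSetKey d p.1 p.2) expert_validations

-- ===== PRECONDITION & SPEC =====
-- Pre_ excludes association lists whose dict-typed components (expert_validations, or the first
-- validation_data row) carry duplicate keys: such lists correspond to no Python dict (duplicates
-- collapse on construction), so the assoc-list behaviour there is accidental.
def Pre_apply_adaptive_logic (expert_validations : List (String × List (List (String × Option String)))) (data_types : List String) (validation_data : List (List (String × String))) : Prop :=
  (expert_validations.map Prod.fst).Nodup ∧ ((validation_data.headD []).map Prod.fst).Nodup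
instance (expert_validations : List (String × List (List (String × Option String)))) (data_types : List String) (validation_data : List (List (String × String))) : Decidable (Pre_apply_adaptive_logic expert_validations data_types validation_data) := by unfold Pre_apply_adaptive_logic; infer_instance

def pvWitness_apply_adaptive_logic : (List (String × List (List (String × Option String)))) × List String × (List (List (String × String))) :=
  ([("lithium_chemistry", [[("pass", some "True")]]), ("other_check", [])], ["price"],
   [[("Entity_Name", "Copper Mine"), ("Unit", "kt")]])

def Spec_apply_adaptive_logic (expert_validations : List (String × List (List (String × Option String)))) (data_types : List String) (validation_data : List (List (String × String))) (out : List (String × List (List (String × Option String)))) : Prop := out = apply_adaptive_logic_alt expert_validations data_types validation_data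
instance (expert_validations : List (String × List (List (String × Option String)))) (data_types : List String) (validation_data : List (List (String × String))) (out : List (String × List (List (String × Option String)))) : Decidable (Spec_apply_adaptive_logic expert_validations data_types validation_data out) := by unfold Spec_apply_adaptive_logic; infer_instance

-- ===== CLAIM (what is proved, stated in full; the proofs are below) =====
def Claim_equal_apply_adaptive_logic : Prop := ∀ (expert_validations : List (String × List (List (String × Option String)))) (data_types : List String) (validation_data : List (List (String × String))), Dom_apply_adaptive_logic expert_validations data_types validation_data → Pre_apply_adaptive_logic expert_validations data_types validation_data → Spec_apply_adaptive_logic expert_validations data_types validation_data (apply_adaptive_logic expert_validations data_types validation_data)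

-- ===== LEMMAS AND PROOFS =====

theorem pvWitness_ok : Dom_apply_adaptive_logic (pvWitness_apply_adaptive_logic.1) (pvWitness_apply_adaptive_logic.2.1) (pvWitness_apply_adaptive_logic.2.2) ∧ Pre_apply_adaptive_logic (pvWitness_apply_adaptive_logic.1) (pvWitness_apply_adaptive_logic.2.1) (pvWitness_apply_adaptive_logic.2.2) := by
  constructor <;> decide

-- first-match lookup on an association list (proof-only helper)
def pvLookup {V : Type} : List (String × V) → String → Option V
  | [], _ => none
  | (k, v) :: rest, x => if k == x then some v else pvLookup rest x

theorem pvLookup_append {V : Type} (a b : List (String × V)) (x : String) :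
    pvLookup (a ++ b) x = ((pvLookup a x).or (pvLookup b x)) := by
  induction a with
  | nil => simp [pvLookup]
  | cons p rest ih =>
    obtain ⟨k, v⟩ := p
    by_cases h : k = x <;> simp [pvLookup, h, ih]

theorem pvLookup_map_const {V : Type} (r : V) (xs : List String) (x : String) :
    pvLookup (xs.map (fun k => (k, r))) x = if x ∈ xs then some r else none := by
  induction xs with
  | nil => simp [pvLookup]
  | cons k ks ih =>
    by_cases h : k = x
    · subst h; simp [pvLookup]
    · have h' : ¬ x = k := fun hh => h hh.symm
      simp [pvLookup, h, h', ih]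

theorem pvLookup_eq_none {V : Type} (ov : List (String × V)) (x : String)
    (h : x ∉ ov.map Prod.fst) : pvLookup ov x = none := by
  induction ov with
  | nil => rfl
  | cons p rest ih =>
    obtain ⟨k, v⟩ := p
    simp only [List.map_cons, List.mem_cons, not_or] at h
    have hkx : ¬ k = x := fun hh => h.1 hh.symm
    simp [pvLookup, hkx, ih h.2]

theorem pvSetKey_eq_map {V : Type} (l : List (String × V)) (k : String) (r : V)
    (hnd : (l.map Prod.fst).Nodup) (hk : k ∈ l.map Prod.fst) :
    pvSetKey l k r = l.map (fun e => if e.1 = k then (k, r) else e) := by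
  induction l with
  | nil => simp at hk
  | cons p rest ih =>
    obtain ⟨k', v'⟩ := p
    simp only [List.map_cons, List.nodup_cons] at hnd
    by_cases h : k' = k
    · subst h
      have : rest.map (fun e => if e.1 = k' then (k', r) else e) = rest := by
        apply List.map_congr_left ?_ |>.trans (List.map_id _)
        intro e he
        have : e.1 ≠ k' := fun hh => hnd.1 (hh ▸ List.mem_map_of_mem he)
        simp [this]
      simp [pvSetKey, this]
    · simp only [List.map_cons, List.mem_cons] at hk
      rcases hk with hk | hk
      · exact absurd hk.symm h
      · simp [pvSetKey, h, ih hnd.2 hk]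

theorem map_fst_pvSetKey {V : Type} (l : List (String × V)) (k : String) (r : V)
    (hnd : (l.map Prod.fst).Nodup) (hk : k ∈ l.map Prod.fst) :
    (pvSetKey l k r).map Prod.fst = l.map Prod.fst := by
  rw [pvSetKey_eq_map l k r hnd hk, List.map_map]
  apply List.map_congr_left
  intro e _
  by_cases h : e.1 = k <;> simp [h]

theorem foldl_stepOpt_cons {V : Type} (f : String → Option V) (ks : List String)
    (k : String) (x : V) (rest : List (String × V)) (hk : k ∉ ks) :
    ks.foldl (fun d k' => match f k' with | some r => pvSetKey d k' r | none => d) ((k, x) :: rest)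
      = (k, x) :: ks.foldl (fun d k' => match f k' with | some r => pvSetKey d k' r | none => d) rest := by
  induction ks generalizing rest with
  | nil => rfl
  | cons k' ks ih =>
    simp only [List.mem_cons, not_or] at hk
    have hne : (k == k') = false := by simp [hk.1]
    simp only [List.foldl_cons]
    cases hf : f k' with
    | none => simpa [hf] using ih rest hk.2
    | some r =>
      simp only [hf]
      have : pvSetKey ((k, x) :: rest) k' r = (k, x) :: pvSetKey rest k' r := by
        simp [pvSetKey, hne]
      rw [this, ih _ hk.2]

theorem foldl_stepOpt_eq_map {V : Type} (f : String → Option V) (l : List (String × V))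
    (h : (l.map Prod.fst).Nodup) :
    (l.map Prod.fst).foldl (fun d k' => match f k' with | some r => pvSetKey d k' r | none => d) l
      = l.map (fun e => match f e.1 with | some r => (e.1, r) | none => e) := by
  induction l with
  | nil => rfl
  | cons p rest ih =>
    obtain ⟨k, v⟩ := p
    simp only [List.map_cons, List.nodup_cons] at h
    simp only [List.map_cons, List.foldl_cons]
    cases hf : f k with
    | none =>
      simp only [hf]
      rw [foldl_stepOpt_cons f _ k v rest h.1, ih h.2]
    | some r =>
      simp only [hf]
      have : pvSetKey ((k, v) :: rest) k r = (k, r) :: rest := by simp [pvSetKey]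
      rw [this, foldl_stepOpt_cons f _ k r rest h.1, ih h.2]

theorem foldl_set_eq_map {V : Type} (ov : List (String × V)) (l : List (String × V))
    (hl : (l.map Prod.fst).Nodup) (hov : (ov.map Prod.fst).Nodup)
    (hsub : ∀ p ∈ ov, p.1 ∈ l.map Prod.fst) :
    ov.foldl (fun d p => pvSetKey d p.1 p.2) l
      = l.map (fun e => match pvLookup ov e.1 with | some r => (e.1, r) | none => e) := by
  induction ov generalizing l with
  | nil => simp [pvLookup]
  | cons p ov' ih =>
    obtain ⟨k, r⟩ := p
    simp only [List.map_cons, List.nodup_cons] at hov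
    have hkl : k ∈ l.map Prod.fst := hsub (k, r) (by simp)
    simp only [List.foldl_cons]
    have hkeys := map_fst_pvSetKey l k r hl hkl
    rw [pvSetKey_eq_map l k r hl hkl]
    rw [ih (l.map (fun e => if e.1 = k then (k, r) else e))
        (by rw [← pvSetKey_eq_map l k r hl hkl, hkeys]; exact hl)
        hov.2
        (by intro q hq
            rw [← pvSetKey_eq_map l k r hl hkl, hkeys]
            exact hsub q (List.mem_cons_of_mem _ hq))]
    rw [List.map_map]
    apply List.map_congr_left
    intro e _
    by_cases h : e.1 = k
    · simp [Function.comp, h, pvLookup, pvLookup_eq_none ov' k hov.1]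
    · have h' : ¬ k = e.1 := fun hh => h hh.symm
      simp [Function.comp, h, h', pvLookup]


theorem map_fst_pair {V : Type} (r : V) (xs : List String) :
    (xs.map (fun k => (k, r))).map Prod.fst = xs := by
  simp [Function.comp_def]

-- the shared combinatorial core: A's conditional per-key fold equals B's override-list fold
theorem pv_core {V : Type} (ev : List (String × V)) (hnd : (ev.map Prod.fst).Nodup)
    (b e : Bool) (r1 r2 : V) :
    (ev.map Prod.fst).foldl (fun d k =>
        if k ∈ ["battery_size_evolution", "lithium_chemistry"] then
          (if !b then pvSetKey d k r1 else d)
        else if k ∈ ["oil_displacement", "derived_oil_displacement", "capacity_factor", "global_oil_sanity"] then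
          (if !e then pvSetKey d k r2 else d)
        else d) ev
    = (if !e then
        (if !b then
          ([] : List (String × V)) ++ ((["battery_size_evolution", "lithium_chemistry"].filter
            (fun key => ev.any (fun x => x.1 == key))).map (fun key => (key, r1)))
         else []) ++ ((["oil_displacement", "derived_oil_displacement", "capacity_factor", "global_oil_sanity"].filter
            (fun key => ev.any (fun x => x.1 == key))).map (fun key => (key, r2)))
       else
        (if !b then
          ([] : List (String × V)) ++ ((["battery_size_evolution", "lithium_chemistry"].filter
            (fun key => ev.any (fun x => x.1 == key))).map (fun key => (key, r1)))
         else [])).foldl (fun d p => pvSetKey d p.1 p.2) ev := by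
  have hstep : (fun (d : List (String × V)) (k : String) =>
        if k ∈ ["battery_size_evolution", "lithium_chemistry"] then
          (if !b then pvSetKey d k r1 else d)
        else if k ∈ ["oil_displacement", "derived_oil_displacement", "capacity_factor", "global_oil_sanity"] then
          (if !e then pvSetKey d k r2 else d)
        else d)
      = (fun d k =>
          match (if k ∈ ["battery_size_evolution", "lithium_chemistry"] then
                   (if !b then some r1 else none)
                 else if k ∈ ["oil_displacement", "derived_oil_displacement", "capacity_factor", "global_oil_sanity"] then
                   (if !e then some r2 else none)
                 else none) with
          | some r => pvSetKey d k r
          | none => d) := by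
    funext d k; split_ifs <;> rfl
  rw [hstep, foldl_stepOpt_eq_map _ ev hnd]
  -- the filtered override lists and their key facts
  set P : String → Bool := fun key => ev.any (fun x => x.1 == key) with hP
  have hPmem : ∀ p ∈ ev, P p.1 = true := fun p hp =>
    List.any_eq_true.mpr ⟨p, hp, by simp⟩
  have hsub1 : ∀ q ∈ (["battery_size_evolution", "lithium_chemistry"].filter P).map
      (fun key => (key, r1)), q.1 ∈ ev.map Prod.fst := by
    intro q hq
    simp only [List.mem_map, List.mem_filter, hP, List.any_eq_true, beq_iff_eq] at hq
    obtain ⟨k, ⟨-, x, hx, hxk⟩, rfl⟩ := hq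
    exact List.mem_map.mpr ⟨x, hx, hxk⟩
  have hsub2 : ∀ q ∈ (["oil_displacement", "derived_oil_displacement", "capacity_factor", "global_oil_sanity"].filter P).map
      (fun key => (key, r2)), q.1 ∈ ev.map Prod.fst := by
    intro q hq
    simp only [List.mem_map, List.mem_filter, hP, List.any_eq_true, beq_iff_eq] at hq
    obtain ⟨k, ⟨-, x, hx, hxk⟩, rfl⟩ := hq
    exact List.mem_map.mpr ⟨x, hx, hxk⟩
  have hnd1 : (["battery_size_evolution", "lithium_chemistry"].filter P).Nodup :=
    List.Nodup.filter _ (by decide)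
  have hnd2 : (["oil_displacement", "derived_oil_displacement", "capacity_factor", "global_oil_sanity"].filter P).Nodup :=
    List.Nodup.filter _ (by decide)
  have hdisj : ∀ a, a ∈ ["battery_size_evolution", "lithium_chemistry"].filter P →
      a ∈ ["oil_displacement", "derived_oil_displacement", "capacity_factor", "global_oil_sanity"].filter P → False := by
    intro a h1 h2
    have h1' := (List.mem_filter.mp h1).1
    have h2' := (List.mem_filter.mp h2).1
    simp only [List.mem_cons, List.not_mem_nil, or_false] at h1' h2'
    rcases h1' with rfl | rfl <;> simp at h2'
  cases b <;> cases e <;>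
    simp only [Bool.not_true, Bool.not_false, Bool.false_eq_true, eq_self_iff_true,
      if_true, if_false, List.nil_append, List.append_nil] <;>
    [skip; skip; skip; skip]
  · -- b = false, e = false : both groups overridden
    rw [foldl_set_eq_map _ ev hnd
        (by rw [List.map_append, map_fst_pair, map_fst_pair]
            exact List.Nodup.append hnd1 hnd2 (fun a ha hb => hdisj a ha hb))
        (by intro q hq
            rcases List.mem_append.mp hq with h | h
            · exact hsub1 q h
            · exact hsub2 q h)]
    apply List.map_congr_left
    intro p hp
    have hPp := hPmem p hp
    by_cases h1 : p.1 ∈ ["battery_size_evolution", "lithium_chemistry"]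
    · simp [h1, hPp, pvLookup_append, pvLookup_map_const, List.mem_filter]
    · by_cases h2 : p.1 ∈ ["oil_displacement", "derived_oil_displacement", "capacity_factor", "global_oil_sanity"]
      · simp [h1, h2, hPp, pvLookup_append, pvLookup_map_const, List.mem_filter]
      · simp [h1, h2, pvLookup_append, pvLookup_map_const, List.mem_filter]
  · -- b = false, e = true : only the battery group overridden
    rw [foldl_set_eq_map _ ev hnd
        (by rw [map_fst_pair]; exact hnd1)
        hsub1]
    apply List.map_congr_left
    intro p hp
    have hPp := hPmem p hp
    by_cases h1 : p.1 ∈ ["battery_size_evolution", "lithium_chemistry"]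
    · simp [h1, hPp, pvLookup_map_const, List.mem_filter]
    · by_cases h2 : p.1 ∈ ["oil_displacement", "derived_oil_displacement", "capacity_factor", "global_oil_sanity"]
      · simp [h1, h2, pvLookup_map_const, List.mem_filter]
      · simp [h1, h2, pvLookup_map_const, List.mem_filter]
  · -- b = true, e = false : only the energy group overridden
    rw [foldl_set_eq_map _ ev hnd
        (by rw [map_fst_pair]; exact hnd2)
        hsub2]
    apply List.map_congr_left
    intro p hp
    have hPp := hPmem p hp
    by_cases h1 : p.1 ∈ ["battery_size_evolution", "lithium_chemistry"]
    · have h2 : p.1 ∉ ["oil_displacement", "derived_oil_displacement", "capacity_factor", "global_oil_sanity"] := by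
        simp only [List.mem_cons, List.not_mem_nil, or_false] at h1
        rcases h1 with h | h <;> rw [h] <;> decide
      simp [h1, h2, pvLookup_map_const, List.mem_filter]
    · by_cases h2 : p.1 ∈ ["oil_displacement", "derived_oil_displacement", "capacity_factor", "global_oil_sanity"]
      · simp [h1, h2, hPp, pvLookup_map_const, List.mem_filter]
      · simp [h1, h2, pvLookup_map_const, List.mem_filter]
  · -- b = true, e = true : nothing overridden
    rw [foldl_set_eq_map ([] : List (String × V)) ev hnd (by simp) (by simp)]
    apply List.map_congr_left
    intro p hp
    by_cases h1 : p.1 ∈ ["battery_size_evolution", "lithium_chemistry"] <;>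
      by_cases h2 : p.1 ∈ ["oil_displacement", "derived_oil_displacement", "capacity_factor", "global_oil_sanity"] <;>
      simp [h1, h2, pvLookup]

-- ===== VERDICT (by name: the statement is the Claim_ definition above) =====
theorem apply_adaptive_logic_spec : Claim_equal_apply_adaptive_logic := by
  intro ev dt vd _hdom hpre
  show apply_adaptive_logic ev dt vd = apply_adaptive_logic_alt ev dt vd
  unfold apply_adaptive_logic apply_adaptive_logic_alt
  simp only [List.foldl_cons, List.foldl_nil]
  exact pv_core ev hpre.1 _ _ _ _
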